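-- pv_equiv track=rewrite | github.com/AndreLuque/Amazon-Forest-Fires | ffpy_statistics.py | rangeFFPY
-- ===== SOURCE A (Python) =====
-- def rangeFFPY(forest_fire_per_year) -> int:
-- 	#To find the range first we must obtain the highest and lowest number of forest fires in a year
-- 	maxValue = forest_fire_per_year['number'][0]
-- 	minValue = forest_fire_per_year['number'][0]
-- 	for number in forest_fire_per_year['number']:
-- 		if number > maxValue:
-- 			maxValue = number
-- 		if number < minValue:
-- 			minValue = number
-- 	return int(maxValue - minValue), int(maxValue), int(minValue)
-- ===== SOURCE B (Python) =====
-- def rangeFFPY(forest_fire_per_year) -> int: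
-- 	ordered = sorted(forest_fire_per_year['number'])
-- 	minValue = ordered[0]
-- 	maxValue = ordered[-1]
-- 	return int(maxValue - minValue), int(maxValue), int(minValue)
-- ===== Notes on version B (the rewrite author's own statement) =====
-- stated objective: alternative
-- what changed: Replaces the single-pass running max/min accumulator loop with a sort-then-endpoints algorithm: sort the list once and read the minimum at index 0 and the maximum at index -1.
import Mathlib
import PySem

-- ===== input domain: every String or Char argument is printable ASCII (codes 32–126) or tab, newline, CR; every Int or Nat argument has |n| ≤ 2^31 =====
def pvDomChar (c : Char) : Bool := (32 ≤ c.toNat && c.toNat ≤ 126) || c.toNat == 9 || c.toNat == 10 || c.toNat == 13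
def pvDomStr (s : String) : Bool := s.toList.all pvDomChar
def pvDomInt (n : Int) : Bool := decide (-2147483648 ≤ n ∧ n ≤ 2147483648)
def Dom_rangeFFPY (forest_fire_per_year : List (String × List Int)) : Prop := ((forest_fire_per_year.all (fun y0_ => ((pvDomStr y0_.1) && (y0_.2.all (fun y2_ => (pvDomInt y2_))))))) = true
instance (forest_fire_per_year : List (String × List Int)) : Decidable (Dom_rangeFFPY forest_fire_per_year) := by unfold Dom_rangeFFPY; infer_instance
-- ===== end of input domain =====

-- B: different algorithm — sort the 'number' list once and read min at index 0, max at index -1, instead of A's single-pass running max/min accumulator loop; equal on Pre_ (key "number" present with a nonempty list).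


-- ===== PORT A =====
def rangeFFPY (forest_fire_per_year : List (String × List Int)) : Int × Int × Int :=
  match PySem.Dict.get? (PySem.Dict.mk forest_fire_per_year) "number" with
  | none => (0, 0, 0)            -- KeyError, excluded by Pre_
  | some nums =>
    match PySem.List.pyGet? nums (0 : Int) with
    | none => (0, 0, 0)          -- IndexError on empty list, excluded by Pre_
    | some v0 =>
      let st := nums.foldl
        (fun (p : Int × Int) number =>
          (if number > p.1 then number else p.1,
           if number < p.2 then number else p.2))
        (v0, v0)
      (st.1 - st.2, st.1, st.2)

-- ===== PORT B =====
def rangeFFPY_alt (forest_fire_per_year : List (String × List Int)) : Int × Int × Int :=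
  match PySem.Dict.get? (PySem.Dict.mk forest_fire_per_year) "number" with
  | none => (0, 0, 0)            -- KeyError, excluded by Pre_
  | some nums =>
    let ordered := PySem.List.sorted nums (fun x => x) false
    match PySem.List.pyGet? ordered (0 : Int), PySem.List.pyGet? ordered (-1 : Int) with
    | some minValue, some maxValue => (maxValue - minValue, maxValue, minValue)
    | _, _ => (0, 0, 0)          -- IndexError on empty list, excluded by Pre_

-- ===== PRECONDITION & SPEC =====
-- A raises KeyError without key "number" and IndexError on an empty "number" list; B raises the same exceptions there.
def Pre_rangeFFPY (forest_fire_per_year : List (String × List Int)) : Prop :=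
  (PySem.Dict.get? (PySem.Dict.mk forest_fire_per_year) "number").getD [] ≠ []
instance (forest_fire_per_year : List (String × List Int)) : Decidable (Pre_rangeFFPY forest_fire_per_year) := by unfold Pre_rangeFFPY; infer_instance
def pvWitness_rangeFFPY : (List (String × List Int)) := [("number", [3, 1, 5])]
def Spec_rangeFFPY (forest_fire_per_year : List (String × List Int)) (out : Int × Int × Int) : Prop := out = rangeFFPY_alt forest_fire_per_year
instance (forest_fire_per_year : List (String × List Int)) (out : Int × Int × Int) : Decidable (Spec_rangeFFPY forest_fire_per_year out) := by unfold Spec_rangeFFPY; infer_instance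

-- ===== CLAIM (what is proved, stated in full; the proofs are below) =====
def Claim_equal_rangeFFPY : Prop := ∀ (forest_fire_per_year : List (String × List Int)), Dom_rangeFFPY forest_fire_per_year → Pre_rangeFFPY forest_fire_per_year → Spec_rangeFFPY forest_fire_per_year (rangeFFPY forest_fire_per_year)

-- ===== LEMMAS AND PROOFS =====
-- A's paired accumulator loop splits into the two Mathlib foldl extrema.
theorem pair_foldl_max_min (t : List Int) (x y : Int) :
    t.foldl (fun (p : Int × Int) number =>
      (if number > p.1 then number else p.1,
       if number < p.2 then number else p.2)) (x, y)
    = (t.foldl max x, t.foldl min y) := by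
  induction t generalizing x y with
  | nil => rfl
  | cons n t ih =>
    have h1 : (if n > x then n else x) = max x n := by rw [max_def]; split_ifs <;> omega
    have h2 : (if n < y then n else y) = min y n := by rw [min_def]; split_ifs <;> omega
    simp only [List.foldl_cons, h1, h2, ih]

-- In a Pairwise (≤) list, the last element is an upper bound.
theorem le_getLast_of_pairwise (l : List Int) (h : l.Pairwise (· ≤ ·)) (hne : l ≠ [])
    (y : Int) (hy : y ∈ l) : y ≤ l.getLast hne := by
  induction l with
  | nil => exact absurd rfl hne
  | cons a t ih =>
    rcases List.pairwise_cons.mp h with ⟨ha, ht⟩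
    cases t with
    | nil => simp at hy; simp [hy]
    | cons b u =>
      rw [List.getLast_cons (by simp)]
      rcases List.mem_cons.mp hy with rfl | hyt
      · exact ha _ (List.getLast_mem (by simp))
      · exact ih ht (by simp) hyt

-- index 0 of the sorted list = A's running minimum
theorem sorted_get_zero (x : Int) (t : List Int) :
    PySem.List.pyGet? (PySem.List.sorted (x :: t) (fun z => z) false) (0 : Int)
      = some (t.foldl min x) := by
  have hne : PySem.List.sorted (x :: t) (fun z => z) false ≠ [] := by
    simp [PySem.List.sorted_eq_nil_iff]
  cases hs : PySem.List.sorted (x :: t) (fun z => z) false with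
  | nil => exact absurd hs hne
  | cons m r =>
    rw [PySem.List.pyGet?_zero_cons]
    have hmin : PySem.List.min? (x :: t) (fun z => z) = some (t.foldl min x) :=
      PySem.List.min?_id_cons x t
    have hmem : t.foldl min x ∈ x :: t := PySem.List.min?_mem hmin
    have hlow : m ≤ t.foldl min x := (PySem.List.key_head_sorted_le _ _ hs) _ hmem
    have hm_mem : m ∈ x :: t := by
      rw [← PySem.List.mem_sorted (key := fun z => z) (rev := false), hs]; simp
    have hup : t.foldl min x ≤ m := PySem.List.min?_isMin hmin _ hm_mem
    exact congrArg some (le_antisymm hlow hup)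

-- index -1 of the sorted list = A's running maximum
theorem sorted_get_neg_one (x : Int) (t : List Int) :
    PySem.List.pyGet? (PySem.List.sorted (x :: t) (fun z => z) false) (-1 : Int)
      = some (t.foldl max x) := by
  have hne : PySem.List.sorted (x :: t) (fun z => z) false ≠ [] := by
    simp [PySem.List.sorted_eq_nil_iff]
  rw [PySem.List.pyGet?_neg_one, List.getLast?_eq_some_getLast (h := hne)]
  have hpw : (PySem.List.sorted (x :: t) (fun z => z) false).Pairwise (· ≤ ·) :=
    PySem.List.sorted_pairwise (xs := x :: t) (key := fun z => z)
  have hmax : PySem.List.max? (x :: t) (fun z => z) = some (t.foldl max x) :=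
    PySem.List.max?_id_cons x t
  have hmem : t.foldl max x ∈ PySem.List.sorted (x :: t) (fun z => z) false := by
    rw [PySem.List.mem_sorted]; exact PySem.List.max?_mem hmax
  have hlast_mem : (PySem.List.sorted (x :: t) (fun z => z) false).getLast hne ∈ (x :: t) := by
    rw [← PySem.List.mem_sorted (key := fun z => z) (rev := false)]
    exact List.getLast_mem hne
  exact congrArg some (le_antisymm
    (PySem.List.max?_isMax hmax _ hlast_mem)
    (le_getLast_of_pairwise _ hpw hne _ hmem))

-- ===== VERDICT (by name: the statement is the Claim_ definition above) =====
theorem rangeFFPY_spec : Claim_equal_rangeFFPY := by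
  intro d _ hpre
  unfold Spec_rangeFFPY rangeFFPY rangeFFPY_alt
  unfold Pre_rangeFFPY at hpre
  cases hget : PySem.Dict.get? (PySem.Dict.mk d) "number" with
  | none => simp [hget] at hpre
  | some nums =>
    simp only [hget, Option.getD] at hpre ⊢
    cases nums with
    | nil => exact absurd rfl hpre
    | cons x t =>
      simp only [PySem.List.pyGet?_zero_cons, sorted_get_zero, sorted_get_neg_one,
        pair_foldl_max_min]
      simp [max_self, min_self]
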